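-- pv_equiv track=rewrite | github.com/thotalakshmimounika/IntermediateDSA | BitManipulation/Maximum and pair.py | solve
-- ===== SOURCE A (Python) =====
-- def solve(a):
--     n=len(a)
--     ans=0
--     for i in range(30,-1,-1):
--         c=0
--         for j in range(n):
--             if a[j]&(1<<i):
--                 c+=1
--         if c>=2:
--             ans=ans|(1<<i)
--             for j in range(n):
--                 if a[j]&(1<<i)==False:
--                     a[j]=0
--     return ans
-- ===== SOURCE B (Python) =====
-- def solve(a):
--     # Non-mutating greedy over bits: keep only the integer mask `ans`;
--     # a bit is accepted when >= 2 elements contain all accepted bits plus this one.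
--     ans = 0
--     for i in range(30, -1, -1):
--         cand = ans | (1 << i)
--         if sum(1 for x in a if x & cand == cand) >= 2:
--             ans = cand
--     # reproduce A's observable in-place side effect in one closing pass
--     for j in range(len(a)):
--         if a[j] & ans != ans:
--             a[j] = 0
--     return ans
-- ===== Notes on version B (the rewrite author's own statement) =====
-- stated objective: faster
-- what changed: B replaces A's in-place candidate-narrowing (zeroing array entries at every accepted bit, then re-counting single bits on the mutated array) by a pure greedy that keeps only the integer mask ans and counts elements x with x & (ans|1<<i) == (ans|1<<i); A's observable mutation of the argument is reproduced in one closing pass, and the proved equivalence is about the return value.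
import Mathlib
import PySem

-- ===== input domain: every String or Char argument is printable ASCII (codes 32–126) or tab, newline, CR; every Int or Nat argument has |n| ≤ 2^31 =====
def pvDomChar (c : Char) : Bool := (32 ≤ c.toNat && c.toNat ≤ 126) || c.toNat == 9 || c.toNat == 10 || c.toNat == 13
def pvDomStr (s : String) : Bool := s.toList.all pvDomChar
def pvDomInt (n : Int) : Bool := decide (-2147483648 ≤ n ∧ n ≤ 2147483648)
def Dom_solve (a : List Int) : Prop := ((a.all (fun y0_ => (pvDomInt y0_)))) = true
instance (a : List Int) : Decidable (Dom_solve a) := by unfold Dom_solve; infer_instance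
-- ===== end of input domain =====

-- B replaces A's in-place candidate narrowing by a pure greedy over the mask `ans` alone
-- (objective: alternative). A mutates its argument in place; the equivalence proved here is
-- about the RETURN value only (Source B reproduces the mutation in one closing pass).

-- ===== PORT A =====
-- one iteration of A's outer loop: state = (the mutated array, ans), bit index i
def solveStep (st : List Int × Int) (i : Nat) : List Int × Int :=
  let bit : Int := (1 : Int) <<< i
  let c : Int := st.1.foldl (fun c x => if PySem.Int.band x bit ≠ 0 then c + 1 else c) 0
  if 2 ≤ c then
    (st.1.map (fun x => if PySem.Int.band x bit = 0 then 0 else x), PySem.Int.bor st.2 bit)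
  else st

def solve (a : List Int) : Int :=
  (((List.range 31).reverse).foldl solveStep (a, 0)).2

-- ===== PORT B =====
def solve_alt (a : List Int) : Int :=
  ((List.range 31).reverse).foldl
    (fun (ans : Int) (i : Nat) =>
      let cand : Int := PySem.Int.bor ans ((1 : Int) <<< i)
      if 2 ≤ (a.countP (fun x => PySem.Int.band x cand = cand) : Int) then cand else ans)
    0

-- ===== PRECONDITION & SPEC =====
def Spec_solve (a : List Int) (out : Int) : Prop := out = solve_alt a
instance (a : List Int) (out : Int) : Decidable (Spec_solve a out) := by unfold Spec_solve; infer_instance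

-- ===== CLAIM (what is proved, stated in full; the proofs are below) =====
def Claim_equal_solve : Prop := ∀ (a : List Int), Dom_solve a → Spec_solve a (solve a)

-- ===== LEMMAS AND PROOFS =====

-- Subset-of-bits characterisation of `v &&& m = m` on Nat
theorem pv_nat_and_eq_iff (v m : Nat) :
    v &&& m = m ↔ ∀ k, m.testBit k = true → v.testBit k = true := by
  constructor
  · intro h k hk
    have := congrArg (fun t => t.testBit k) h
    simp [hk] at this
    exact this
  · intro h
    apply Nat.eq_of_testBit_eq
    intro k
    rw [Nat.testBit_land]
    cases hm : m.testBit k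
    · simp
    · simp [h k hm]

theorem pv_nat_and_eq_zero_iff (m u : Nat) :
    m &&& u = 0 ↔ ∀ k, m.testBit k = true → u.testBit k = false := by
  constructor
  · intro h k hk
    have := congrArg (fun t => t.testBit k) h
    simp [hk] at this
    exact this
  · intro h
    apply Nat.eq_of_testBit_eq
    intro k
    rw [Nat.testBit_land, Nat.zero_testBit]
    cases hm : m.testBit k
    · simp
    · simp [h k hm]

-- PySem.Int.band of a negative left argument with a Nat cast on the right
theorem pv_band_neg_natCast (x : Int) (hx : ¬ 0 ≤ x) (m : Nat) :
    PySem.Int.band x (m : Int) = ((m - (m &&& (-x - 1).toNat) : Nat) : Int) := by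
  unfold PySem.Int.band
  rw [if_neg hx, if_pos (by positivity)]
  simp

theorem pv_band_nonneg_natCast (x : Int) (hx : 0 ≤ x) (m : Nat) :
    PySem.Int.band x (m : Int) = ((x.toNat &&& m : Nat) : Int) := by
  rw [PySem.Int.band_of_nonneg hx (by positivity)]
  simp

-- `x & m == m` for a Nat mask m, characterised through bits (both signs of x)
theorem pv_band_eq_iff (x : Int) (m : Nat) :
    PySem.Int.band x (m : Int) = (m : Int) ↔
      ∀ k, m.testBit k = true →
        (if 0 ≤ x then x.toNat.testBit k = true else (-x - 1).toNat.testBit k = false) := by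
  by_cases hx : 0 ≤ x
  · rw [pv_band_nonneg_natCast x hx m, Nat.cast_inj, pv_nat_and_eq_iff]
    simp [hx]
  · rw [pv_band_neg_natCast x hx m, Nat.cast_inj]
    have hle : m &&& (-x - 1).toNat ≤ m := Nat.and_le_left
    constructor
    · intro h
      have h0 : m &&& (-x - 1).toNat = 0 := by omega
      intro k hk
      rw [if_neg hx]
      exact (pv_nat_and_eq_zero_iff m (-x - 1).toNat).1 h0 k hk
    · intro h
      have h0 : m &&& (-x - 1).toNat = 0 := by
        refine (pv_nat_and_eq_zero_iff m (-x - 1).toNat).2 ?_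
        intro k hk
        have := h k hk
        rwa [if_neg hx] at this
      omega

-- splitting a mask: x & (m|||b) == m|||b  ↔  x & m == m  ∧  x & b == b
theorem pv_band_lor_split (x : Int) (m b : Nat) :
    PySem.Int.band x ((m ||| b : Nat) : Int) = ((m ||| b : Nat) : Int) ↔
      (PySem.Int.band x (m : Int) = (m : Int) ∧ PySem.Int.band x (b : Int) = (b : Int)) := by
  rw [pv_band_eq_iff, pv_band_eq_iff, pv_band_eq_iff]
  constructor
  · intro h
    constructor
    · intro k hk; exact h k (by simp [hk])
    · intro k hk; exact h k (by simp [hk])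
  · rintro ⟨h1, h2⟩ k hk
    rw [Nat.testBit_lor] at hk
    rcases Bool.or_eq_true_iff.1 hk with hk | hk
    · exact h1 k hk
    · exact h2 k hk

-- for a single-bit mask, "nonzero" and "equal to the mask" coincide
theorem pv_band_pow_ne_zero_iff (x : Int) (i : Nat) :
    PySem.Int.band x ((2 ^ i : Nat) : Int) ≠ 0 ↔
      PySem.Int.band x ((2 ^ i : Nat) : Int) = ((2 ^ i : Nat) : Int) := by
  have hp : (0 : Int) < ((2 ^ i : Nat) : Int) := by
    exact_mod_cast Nat.two_pow_pos i
  by_cases hx : 0 ≤ x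
  · rw [pv_band_nonneg_natCast x hx, Nat.and_two_pow]
    cases h : x.toNat.testBit i
    · simp only [Bool.toNat_false, Nat.zero_mul, Nat.cast_zero]
      exact ⟨fun h => (h rfl).elim, fun h => (hp.ne h).elim⟩
    · simp only [Bool.toNat_true, Nat.one_mul]
      simp
  · rw [pv_band_neg_natCast x hx, Nat.two_pow_and]
    cases h : (-x - 1).toNat.testBit i
    · simp only [Bool.toNat_false, Nat.mul_zero, Nat.sub_zero]
      simp
    · simp only [Bool.toNat_true, Nat.mul_one, Nat.sub_self, Nat.cast_zero]
      exact ⟨fun h => (h rfl).elim, fun h => (hp.ne h).elim⟩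

-- counting fold of A = countP
theorem pv_foldl_count (l : List Int) (bit : Int) (c : Int) :
    l.foldl (fun c x => if PySem.Int.band x bit ≠ 0 then c + 1 else c) c
      = c + (l.countP (fun x => decide (PySem.Int.band x bit ≠ 0)) : Int) := by
  induction l generalizing c with
  | nil => simp
  | cons y t ih =>
    rw [List.foldl_cons, List.countP_cons]
    by_cases hy : PySem.Int.band y bit ≠ 0
    · rw [if_pos hy, ih, if_pos (by simpa using hy)]
      push_cast
      ring
    · rw [if_neg hy, ih, if_neg (by simpa using hy)]
      simp

-- (1 : Int) <<< i is the cast of the Nat power 2^i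
theorem pv_one_shiftLeft (i : Nat) : ((1 : Int) <<< i) = ((2 ^ i : Nat) : Int) := by
  rw [Int.shiftLeft_eq]
  push_cast
  ring

-- the survivor of A's zeroing passes so far, given the accepted mask M
def pvKeep (M : Nat) (x : Int) : Int :=
  if PySem.Int.band x (M : Int) = (M : Int) then x else 0

theorem pv_keep_zero (a : List Int) : a.map (pvKeep 0) = a := by
  have : ∀ x : Int, pvKeep 0 x = x := by
    intro x
    unfold pvKeep
    have h : PySem.Int.band x ((0 : Nat) : Int) = ((0 : Nat) : Int) := by
      rw [Nat.cast_zero, PySem.Int.band_zero]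
    rw [if_pos h]
  have h1 : a.map (pvKeep 0) = a.map id := List.map_congr_left (fun x _ => this x)
  rw [h1, List.map_id]

theorem pv_band_zero_left (b : Int) : PySem.Int.band 0 b = 0 := by
  rw [PySem.Int.band_comm, PySem.Int.band_zero]

-- the invariant: running A's loop from the narrowed array with ans = M
-- gives the same mask as running B's pure loop from M
theorem pv_inv (a : List Int) (bits : List Nat) (M : Nat) :
    (bits.foldl solveStep (a.map (pvKeep M), (M : Int))).2 =
      bits.foldl
        (fun (ans : Int) (i : Nat) =>
          let cand : Int := PySem.Int.bor ans ((1 : Int) <<< i)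
          if 2 ≤ (a.countP (fun x => PySem.Int.band x cand = cand) : Int) then cand else ans)
        (M : Int) := by
  induction bits generalizing M with
  | nil => simp
  | cons i t ih =>
    have hbit : ((1 : Int) <<< i) = ((2 ^ i : Nat) : Int) := pv_one_shiftLeft i
    have hcand : PySem.Int.bor (M : Int) ((1 : Int) <<< i) = ((M ||| 2 ^ i : Nat) : Int) := by
      rw [hbit, PySem.Int.bor_natCast]
    -- pointwise: an entry of the narrowed array has bit i set  ↔  x & cand == cand
    have hpt : ∀ x : Int,
        (PySem.Int.band (pvKeep M x) ((1 : Int) <<< i) ≠ 0) =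
          (PySem.Int.band x ((M ||| 2 ^ i : Nat) : Int) = ((M ||| 2 ^ i : Nat) : Int)) := by
      intro x
      unfold pvKeep
      rw [hbit]
      by_cases hM : PySem.Int.band x (M : Int) = (M : Int)
      · rw [if_pos hM]
        rw [eq_iff_iff, pv_band_pow_ne_zero_iff, pv_band_lor_split]
        simp [hM]
      · rw [if_neg hM]
        rw [pv_band_zero_left]
        rw [eq_iff_iff, pv_band_lor_split]
        simp [hM]
    -- the two counts agree
    have hcount :
        ((a.map (pvKeep M)).countP (fun x => PySem.Int.band x ((1 : Int) <<< i) ≠ 0) : Int) =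
          (a.countP (fun x =>
            PySem.Int.band x ((M ||| 2 ^ i : Nat) : Int) = ((M ||| 2 ^ i : Nat) : Int)) : Int) := by
      rw [List.countP_map]
      congr 1
      apply List.countP_congr
      intro x _
      simp [Function.comp_apply, hpt x]
    -- the narrowed array after accepting bit i is the narrowing by M ||| 2^i
    have hmap :
        (a.map (pvKeep M)).map
            (fun x => if PySem.Int.band x ((1 : Int) <<< i) = 0 then 0 else x) =
          a.map (pvKeep (M ||| 2 ^ i)) := by
      rw [List.map_map]
      apply List.map_congr_left
      intro x _
      rw [Function.comp_apply]
      unfold pvKeep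
      by_cases hM : PySem.Int.band x (M : Int) = (M : Int)
      · rw [if_pos hM]
        by_cases hb : PySem.Int.band x ((1 : Int) <<< i) = 0
        · rw [if_pos hb, if_neg]
          intro hc
          rcases (pv_band_lor_split x M (2 ^ i)).1 hc with ⟨_, h2⟩
          rw [hbit] at hb
          exact ((pv_band_pow_ne_zero_iff x i).2 h2) hb
        · rw [if_neg hb, if_pos]
          refine (pv_band_lor_split x M (2 ^ i)).2 ⟨hM, ?_⟩
          rw [hbit] at hb
          exact (pv_band_pow_ne_zero_iff x i).1 hb
      · rw [if_neg hM]
        rw [if_pos (pv_band_zero_left _), if_neg]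
        intro hc
        exact hM ((pv_band_lor_split x M (2 ^ i)).1 hc).1
    simp only [List.foldl_cons]
    have hstep : solveStep (a.map (pvKeep M), (M : Int)) i
        = (if 2 ≤ (a.countP (fun x =>
              PySem.Int.band x ((M ||| 2 ^ i : Nat) : Int) = ((M ||| 2 ^ i : Nat) : Int)) : Int)
            then (a.map (pvKeep (M ||| 2 ^ i)), ((M ||| 2 ^ i : Nat) : Int))
            else (a.map (pvKeep M), (M : Int))) := by
      simp only [solveStep]
      rw [pv_foldl_count, zero_add, hcount, hcand, hmap]
    rw [hstep]
    simp only [hcand]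
    by_cases hc : 2 ≤ (a.countP (fun x =>
        PySem.Int.band x ((M ||| 2 ^ i : Nat) : Int) = ((M ||| 2 ^ i : Nat) : Int)) : Int)
    · rw [if_pos hc, if_pos hc]
      exact ih (M ||| 2 ^ i)
    · rw [if_neg hc, if_neg hc]
      exact ih M

-- ===== VERDICT (by name: the statement is the Claim_ definition above) =====
theorem solve_spec : Claim_equal_solve := by
  intro a _
  unfold Spec_solve solve solve_alt
  have := pv_inv a ((List.range 31).reverse) 0
  rw [pv_keep_zero] at this
  simpa using this
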